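-- pv_equiv track=rewrite | github.com/Albits/advent_of_code | day_12/part_2.py | get_unambiguous_values
-- ===== SOURCE A (Python) =====
-- def get_unambiguous_values(possible_values):
--     unambiguous_springs = [i for i in range(len(possible_values[0]))]
--     unambiguous_dots = [i for i in range(len(possible_values[0]))]
--
--     for value in possible_values:
--         for index, character in enumerate(value):
--             if index in unambiguous_springs and character == ".":
--                 unambiguous_springs.pop(unambiguous_springs.index(index))
--             if index in unambiguous_dots and character == "#":
--                 unambiguous_dots.pop(unambiguous_dots.index(index))
--
--     return unambiguous_springs, unambiguous_dots
-- ===== SOURCE B (Python) =====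
-- def get_unambiguous_values(possible_values):
--     length = len(possible_values[0])
--     unambiguous_springs = [j for j in range(length)
--                            if all(j >= len(row) or row[j] != "." for row in possible_values)]
--     unambiguous_dots = [j for j in range(length)
--                         if all(j >= len(row) or row[j] != "#" for row in possible_values)]
--     return unambiguous_springs, unambiguous_dots
-- ===== Notes on version B (the rewrite author's own statement) =====
-- stated objective: simpler
-- what changed: Replaces the row-major stream that mutates two candidate lists with 'index in list'/list.index/pop (a linear scan per cell) by two independent column-major comprehensions that keep index j iff no row has the forbidden character at j (with a j >= len(row) guard for ragged rows).
import Mathlib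
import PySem

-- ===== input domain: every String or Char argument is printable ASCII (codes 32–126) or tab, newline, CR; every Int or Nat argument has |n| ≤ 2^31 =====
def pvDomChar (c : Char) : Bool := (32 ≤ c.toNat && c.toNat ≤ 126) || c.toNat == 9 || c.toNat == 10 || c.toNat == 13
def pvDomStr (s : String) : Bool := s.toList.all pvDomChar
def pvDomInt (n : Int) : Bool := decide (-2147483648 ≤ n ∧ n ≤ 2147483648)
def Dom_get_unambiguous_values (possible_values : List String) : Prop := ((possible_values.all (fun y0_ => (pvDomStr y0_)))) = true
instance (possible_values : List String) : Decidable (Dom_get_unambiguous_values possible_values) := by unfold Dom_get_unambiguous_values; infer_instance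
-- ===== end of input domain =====

-- B computes each output column-major with two independent comprehensions instead of
-- A's row-major stream that mutates two candidate lists via `in`/index/pop (objective: simpler).


-- ===== PORT A =====
-- l.pop(l.index(v)) as A writes it
def pvPopIndex (l : List Int) (v : Int) : List Int :=
  match PySem.List.index? l v with
  | some k =>
    match PySem.List.pop? l (k : Int) with
    | some r => r.2
    | none => l
  | none => l

-- body of A's inner loop: one (index, character) pair updates both candidate lists
def pvStepA (st : List Int × List Int) (p : Int × Char) : List Int × List Int :=
  let sp := if st.1.contains p.1 && (p.2 == '.') then pvPopIndex st.1 p.1 else st.1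
  let dt := if st.2.contains p.1 && (p.2 == '#') then pvPopIndex st.2 p.1 else st.2
  (sp, dt)

def get_unambiguous_values (possible_values : List String) : List Int × List Int :=
  let L := PySem.Str.len ((PySem.List.pyGet? possible_values 0).getD "")
  let unambiguous_springs := PySem.List.pyRange 0 L 1
  let unambiguous_dots := PySem.List.pyRange 0 L 1
  possible_values.foldl
    (fun st value => (PySem.List.enumerate value.toList 0).foldl pvStepA st)
    (unambiguous_springs, unambiguous_dots)

-- ===== PORT B =====
-- all(j >= len(row) or row[j] != c for row in possible_values)
def pvColFree (possible_values : List String) (c : Char) (j : Int) : Bool :=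
  possible_values.all
    (fun row => decide (PySem.Str.len row ≤ j) || decide (PySem.Str.pyGet? row j ≠ some c))

def get_unambiguous_values_alt (possible_values : List String) : List Int × List Int :=
  let length := PySem.Str.len ((PySem.List.pyGet? possible_values 0).getD "")
  ((PySem.List.pyRange 0 length 1).filter (pvColFree possible_values '.'),
   (PySem.List.pyRange 0 length 1).filter (pvColFree possible_values '#'))

-- ===== PRECONDITION & SPEC =====
-- A raises IndexError on possible_values[0] when the list is empty (B raises the same there).
def Pre_get_unambiguous_values (possible_values : List String) : Prop := possible_values ≠ []
instance (possible_values : List String) : Decidable (Pre_get_unambiguous_values possible_values) := by unfold Pre_get_unambiguous_values; infer_instance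
def pvWitness_get_unambiguous_values : List String := ["#.?", "..", "#"]

def Spec_get_unambiguous_values (possible_values : List String) (out : List Int × List Int) : Prop := out = get_unambiguous_values_alt possible_values
instance (possible_values : List String) (out : List Int × List Int) : Decidable (Spec_get_unambiguous_values possible_values out) := by unfold Spec_get_unambiguous_values; infer_instance

-- ===== CLAIM (what is proved, stated in full; the proofs are below) =====
def Claim_equal_get_unambiguous_values : Prop := ∀ (possible_values : List String), Dom_get_unambiguous_values possible_values → Pre_get_unambiguous_values possible_values → Spec_get_unambiguous_values possible_values (get_unambiguous_values possible_values)

-- ===== LEMMAS AND PROOFS =====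

-- single-list version of A's step, for character c
def pvStep1 (c : Char) (sp : List Int) (p : Int × Char) : List Int :=
  if sp.contains p.1 && (p.2 == c) then pvPopIndex sp p.1 else sp

theorem pvPopIndex_eq_erase (l : List Int) (v : Int) : pvPopIndex l v = l.erase v := by
  induction l with
  | nil => rfl
  | cons x xs ih =>
    by_cases hx : x = v
    · subst hx
      unfold pvPopIndex
      rw [PySem.List.index?_cons_self]
      simp [PySem.List.pop?_zero_cons]
    · unfold pvPopIndex
      rw [PySem.List.index?_cons_of_ne xs hx]
      cases hidx : PySem.List.index? xs v with
      | none =>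
        have hv : v ∉ xs := (PySem.List.index?_eq_none_iff xs v).mp hidx
        simp [List.erase_of_not_mem, hv, hx]
      | some k =>
        have hk : k < xs.length := by
          obtain ⟨pre, suf, hxs, hlen, -⟩ := (PySem.List.index?_eq_some_iff xs v k).mp hidx
          subst hxs; simp [← hlen]
        have hidx' := hidx
        rw [PySem.List.index?_eq_idxOf?] at hidx'
        have hxe : xs.eraseIdx k = xs.erase v := by
          rw [← ih]
          simp [pvPopIndex, hidx', PySem.List.pop?_natCast xs k hk]
        have h1 : (x :: xs).erase v = x :: xs.erase v := List.erase_cons_tail (by simp [hx])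
        have hpop := PySem.List.pop?_natCast (x :: xs) (k + 1) (by simpa using Nat.succ_lt_succ hk)
        simp only [Option.map_some]
        push_cast at hpop ⊢
        rw [hpop]
        simp [List.eraseIdx_cons_succ, hxe, h1]

theorem pvStepA_eq (st : List Int × List Int) (p : Int × Char) :
    pvStepA st p = (pvStep1 '.' st.1 p, pvStep1 '#' st.2 p) := by
  rfl

theorem foldl_pair (ps : List (Int × Char)) (a b : List Int) :
    ps.foldl pvStepA (a, b) = (ps.foldl (pvStep1 '.') a, ps.foldl (pvStep1 '#') b) := by
  induction ps generalizing a b with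
  | nil => rfl
  | cons p ps ih => simp only [List.foldl_cons, pvStepA_eq]; exact ih _ _

theorem foldl_rows_pair (rows : List String) (a b : List Int) :
    rows.foldl (fun st value => (PySem.List.enumerate value.toList 0).foldl pvStepA st) (a, b)
      = (rows.foldl (fun sp value => (PySem.List.enumerate value.toList 0).foldl (pvStep1 '.') sp) a,
         rows.foldl (fun dt value => (PySem.List.enumerate value.toList 0).foldl (pvStep1 '#') dt) b) := by
  induction rows generalizing a b with
  | nil => rfl
  | cons r rows ih => simp only [List.foldl_cons, foldl_pair]; exact ih _ _

theorem pvStep1_eq_filter (c : Char) (sp : List Int) (k : Int) (ch : Char) (h : sp.Nodup) :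
    pvStep1 c sp (k, ch) = sp.filter (fun j => !(k == j && ch == c)) := by
  unfold pvStep1
  by_cases hc : ch = c
  · subst hc
    by_cases hm : k ∈ sp
    · rw [if_pos (by simp [hm]), pvPopIndex_eq_erase, List.Nodup.erase_eq_filter h]
      apply List.filter_congr; intro j _
      simp [bne, eq_comm]
    · rw [if_neg (by simp [hm])]
      refine (List.filter_eq_self.mpr ?_).symm
      intro j hj
      simp only [beq_self_eq_true, Bool.and_true, Bool.not_eq_true', beq_eq_false_iff_ne]
      rintro rfl
      exact hm hj
  · rw [if_neg (by simp [hc])]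
    refine (List.filter_eq_self.mpr ?_).symm
    intro j hj
    simp [hc]

theorem foldl_pvStep1_eq_filter (c : Char) (ps : List (Int × Char)) (sp : List Int) (h : sp.Nodup) :
    ps.foldl (pvStep1 c) sp = sp.filter (fun j => !(ps.any (fun p => p.1 == j && p.2 == c))) := by
  induction ps generalizing sp with
  | nil => simp
  | cons p ps ih =>
    obtain ⟨k, ch⟩ := p
    rw [List.foldl_cons, pvStep1_eq_filter c sp k ch h, ih _ (h.filter _), List.filter_filter]
    apply List.filter_congr; intro j _
    simp only [List.any_cons, Bool.not_or]
    exact Bool.and_comm _ _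

theorem foldl_rows_eq_filter (c : Char) (rows : List String) (sp : List Int) (h : sp.Nodup) :
    rows.foldl (fun sp value => (PySem.List.enumerate value.toList 0).foldl (pvStep1 c) sp) sp
      = sp.filter (fun j => rows.all
          (fun row => !((PySem.List.enumerate row.toList 0).any (fun p => p.1 == j && p.2 == c)))) := by
  induction rows generalizing sp with
  | nil => simp
  | cons row rows ih =>
    rw [List.foldl_cons, foldl_pvStep1_eq_filter c _ sp h, ih _ (h.filter _), List.filter_filter]
    apply List.filter_congr; intro j _
    simp only [List.all_cons]
    exact Bool.and_comm _ _

theorem pred_eq_colFree (c : Char) (row : String) (j : Int) (hj : 0 ≤ j) :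
    (!((PySem.List.enumerate row.toList 0).any (fun p => p.1 == j && p.2 == c)))
      = (decide (PySem.Str.len row ≤ j) || decide (PySem.Str.pyGet? row j ≠ some c)) := by
  have hget : PySem.Str.pyGet? row j = row.toList[j.toNat]? := by
    simp [PySem.Str.pyGet?, PySem.List.pyGet?_of_nonneg _ hj]
  rw [Bool.eq_iff_iff]
  simp only [Bool.not_eq_true', List.any_eq_false, PySem.List.mem_enumerate_iff,
    Bool.or_eq_true, decide_eq_true_eq, PySem.Str.len_eq, hget]
  constructor
  · intro hAll
    by_cases hge : ((row.toList.length : Int)) ≤ j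
    · exact Or.inl hge
    · refine Or.inr ?_
      have hjn : j.toNat < row.toList.length := by omega
      rw [List.getElem?_eq_getElem hjn]
      intro hsome
      have hc : row.toList[j.toNat] = c := by simpa using hsome
      have := hAll (j, c) ⟨j.toNat, hjn, by rw [← hc]; simp; omega⟩
      simp at this
  · rintro (hge | hne) p hp <;> obtain ⟨k, hk, rfl⟩ := hp <;>
      simp only [Bool.and_eq_true, beq_iff_eq]
    · rintro ⟨hkj, -⟩
      omega
    · rintro ⟨hkj, hcc⟩
      apply hne
      have hjk : j.toNat = k := by omega
      rw [List.getElem?_eq_getElem (show j.toNat < row.toList.length by omega)]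
      simp only [Option.some.injEq]
      simpa [hjk] using hcc

-- ===== VERDICT (by name: the statement is the Claim_ definition above) =====
theorem get_unambiguous_values_spec : Claim_equal_get_unambiguous_values := by
  intro pv _ _
  unfold Spec_get_unambiguous_values
  simp only [get_unambiguous_values, get_unambiguous_values_alt]
  rw [foldl_rows_pair,
      foldl_rows_eq_filter _ _ _ (PySem.List.nodup_pyRange_one _ _),
      foldl_rows_eq_filter _ _ _ (PySem.List.nodup_pyRange_one _ _)]
  refine Prod.ext ?_ ?_ <;>
  · apply List.filter_congr
    intro j hjmem
    have hj : 0 ≤ j := (PySem.List.mem_pyRange_one.mp hjmem).1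
    unfold pvColFree
    exact congrArg (List.all pv) (funext fun row => pred_eq_colFree _ row j hj)
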